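-- pv_equiv track=rewrite | github.com/tzou2024/aOc | 2017/day1/script.py | list_of_matches
-- ===== SOURCE A (Python) =====
-- from typing import List
--
-- def list_of_matches(register: List[int]) -> List[int]:
--     valid = []
--     forward = len(register) // 2
--     for ind, val in enumerate(register):
--         to_check = ind
--         for i in range(forward):
--             to_check =( to_check + 1) % len(register)
--         if register[to_check] == val:
--             valid.append(val)
--     return valid
-- ===== SOURCE B (Python) =====
-- def list_of_matches(register):
--     n = len(register)
--     half = n // 2
--     return [v for i, v in enumerate(register) if register[(i + half) % n] == v]
-- ===== Notes on version B (the rewrite author's own statement) =====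
-- stated objective: faster
-- what changed: B computes the halfway index directly as (i + n//2) % n in a single comprehension instead of A's inner loop that steps the index forward n//2 times for every element.
import Mathlib
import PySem

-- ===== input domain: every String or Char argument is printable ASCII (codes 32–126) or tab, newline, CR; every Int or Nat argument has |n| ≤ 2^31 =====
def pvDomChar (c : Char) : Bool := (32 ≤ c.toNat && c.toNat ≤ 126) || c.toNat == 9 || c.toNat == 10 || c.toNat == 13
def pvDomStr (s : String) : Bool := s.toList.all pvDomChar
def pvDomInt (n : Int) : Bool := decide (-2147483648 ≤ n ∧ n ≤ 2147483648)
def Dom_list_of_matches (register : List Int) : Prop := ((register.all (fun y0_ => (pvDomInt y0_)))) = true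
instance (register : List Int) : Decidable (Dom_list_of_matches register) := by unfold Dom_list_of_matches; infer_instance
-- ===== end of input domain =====

-- B replaces A's inner index-stepping loop by direct computation of the halfway
-- index (i + n//2) % n in one pass (objective: faster, asymptotic).


-- ===== PORT A =====
-- 'to_check' starts at ind and is stepped forward n//2 times by the inner range loop;
-- register[to_check] is then always in range, so the IndexError branch is unreachable.
def list_of_matches (register : List Int) : List Int :=
  (PySem.List.enumerate register 0).foldl (fun valid iv =>
    match PySem.List.pyGet? register
        ((List.range (register.length / 2)).foldl
          (fun tc _ => PySem.Int.mod (tc + 1) (register.length : Int)) iv.1) with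
    | some x => if x = iv.2 then valid ++ [iv.2] else valid
    | none => valid) []

-- ===== PORT B =====
def list_of_matches_alt (register : List Int) : List Int :=
  ((PySem.List.enumerate register 0).filter (fun iv =>
      PySem.List.pyGet? register
        (PySem.Int.mod (iv.1 + PySem.Int.floordiv (register.length : Int) 2)
          (register.length : Int)) == some iv.2)).map (·.2)

-- ===== PRECONDITION & SPEC =====
def Spec_list_of_matches (register : List Int) (out : List Int) : Prop := out = list_of_matches_alt register
instance (register : List Int) (out : List Int) : Decidable (Spec_list_of_matches register out) := by unfold Spec_list_of_matches; infer_instance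

-- ===== CLAIM (what is proved, stated in full; the proofs are below) =====
def Claim_equal_list_of_matches : Prop := ∀ (register : List Int), Dom_list_of_matches register → Spec_list_of_matches register (list_of_matches register)

-- ===== LEMMAS AND PROOFS =====

-- the inner stepping loop computes (s + k) % n when the start is already reduced mod n
theorem step_loop_eq (n : Int) (hn : 0 < n) (k : Nat) :
    ∀ s : Int, 0 ≤ s → s < n →
      (List.range k).foldl (fun tc _ => PySem.Int.mod (tc + 1) n) s
        = PySem.Int.mod (s + k) n := by
  induction k with
  | zero =>
      intro s h0 h1
      simp [PySem.Int.mod_eq_emod_of_pos hn, Int.emod_eq_of_lt h0 h1]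
  | succ k ih =>
      intro s h0 h1
      rw [List.range_succ, List.foldl_append, ih s h0 h1]
      simp only [List.foldl_cons, List.foldl_nil]
      rw [PySem.Int.mod_eq_emod_of_pos hn, PySem.Int.mod_eq_emod_of_pos hn,
          PySem.Int.mod_eq_emod_of_pos hn]
      push_cast
      rw [Int.add_emod ((s + (k:Int)) % n) 1 n, Int.emod_emod_of_dvd _ dvd_rfl,
          ← Int.add_emod, ← add_assoc]

theorem list_of_matches_spec : Claim_equal_list_of_matches := by
  intro register _
  unfold Spec_list_of_matches list_of_matches list_of_matches_alt
  rcases hreg : register with _ | ⟨a, tl⟩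
  · simp [PySem.List.enumerate]
  · rw [← hreg]
    have hn : (0 : Int) < (register.length : Int) := by
      rw [hreg]; exact_mod_cast Nat.succ_pos tl.length
    have key := PySem.List.foldl_congr_mem
      (PySem.List.enumerate register 0)
      (fun valid (iv : Int × Int) =>
        match PySem.List.pyGet? register
            ((List.range (register.length / 2)).foldl
              (fun tc _ => PySem.Int.mod (tc + 1) (register.length : Int)) iv.1) with
        | some x => if x = iv.2 then valid ++ [iv.2] else valid
        | none => valid)
      (fun valid (iv : Int × Int) =>
        if PySem.List.pyGet? register
            (PySem.Int.mod (iv.1 + PySem.Int.floordiv (register.length : Int) 2)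
              (register.length : Int)) == some iv.2
        then valid ++ [iv.2] else valid)
      []
      (by
        intro acc iv hmem
        obtain ⟨k, hk, hiv⟩ := (PySem.List.mem_enumerate_iff register 0 iv).mp hmem
        have h1 : iv.1 = (k : Int) := by rw [hiv]; simp
        have hge : 0 ≤ iv.1 := by omega
        have hlt : iv.1 < (register.length : Int) := by
          rw [h1]; exact_mod_cast hk
        simp only []
        rw [step_loop_eq (register.length : Int) hn (register.length / 2) iv.1 hge hlt]
        have hfd : PySem.Int.floordiv (register.length : Int) 2
            = ((register.length / 2 : Nat) : Int) := by
          exact_mod_cast PySem.Int.floordiv_natCast register.length 2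
        rw [hfd]
        cases h : PySem.List.pyGet? register
            (PySem.Int.mod (iv.1 + ((register.length / 2 : Nat) : Int))
              (register.length : Int)) with
        | none => simp
        | some x => by_cases hx : x = iv.2 <;> simp [hx])
    rw [key, PySem.List.foldl_append_if]
    simp
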